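-- pv_equiv track=rewrite | github.com/IERoboticsAILab/RODEO | oracle/oracle_node/validator/ros1_validator.py | _has_stopped_moved_stopped
-- ===== SOURCE A (Python) =====
-- def _has_stopped_moved_stopped(segs):
--     reduced = []
--     for s in segs:
--         if not reduced or s["state"] != reduced[-1]:
--             reduced.append(s["state"])
--     for i in range(len(reduced) - 2):
--         if reduced[i] == "stopped" and reduced[i+1] == "moving" and reduced[i+2] == "stopped":
--             return True
--     return False
-- ===== SOURCE B (Python) =====
-- def _has_stopped_moved_stopped(segs):
--     prev = None
--     phase = 0
--     for s in segs:
--         st = s["state"]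
--         if st == prev:
--             continue
--         if phase == 2 and st == "stopped":
--             return True
--         if phase == 1 and st == "moving":
--             phase = 2
--         else:
--             phase = 1 if st == "stopped" else 0
--         prev = st
--     return False
-- ===== Notes on version B (the rewrite author's own statement) =====
-- stated objective: alternative
-- what changed: Replaces A's two-phase build-reduced-list-then-window-scan with a single streaming pass keeping only the last distinct state and a 3-valued phase (finite state machine), using O(1) extra space.
import Mathlib
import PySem

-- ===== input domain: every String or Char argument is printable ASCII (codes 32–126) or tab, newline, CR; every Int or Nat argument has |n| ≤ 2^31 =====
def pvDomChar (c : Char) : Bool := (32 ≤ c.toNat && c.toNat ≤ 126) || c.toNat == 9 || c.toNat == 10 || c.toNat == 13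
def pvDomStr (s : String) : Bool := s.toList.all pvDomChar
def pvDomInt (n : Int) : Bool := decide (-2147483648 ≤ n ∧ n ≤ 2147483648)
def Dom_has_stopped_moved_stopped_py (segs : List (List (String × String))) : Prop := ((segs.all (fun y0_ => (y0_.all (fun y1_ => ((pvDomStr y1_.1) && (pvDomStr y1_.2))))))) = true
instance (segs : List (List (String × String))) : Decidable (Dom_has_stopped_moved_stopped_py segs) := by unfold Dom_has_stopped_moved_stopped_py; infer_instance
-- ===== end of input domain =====

-- B replaces A's build-reduced-list-then-scan by a single streaming finite-state-machine pass.

-- s["state"]: exact whenever the key is present; Pre_ excludes the missing-key (KeyError) case.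
def pvStateOf (s : List (String × String)) : String :=
  (PySem.Dict.mk s).getD "state" ""

-- ===== PORT A =====
-- the first loop: append s["state"] if reduced is empty or differs from reduced[-1]
def pvReduceStep (red : List String) (s : List (String × String)) : List String :=
  if red = [] ∨ red.getLast? ≠ some (pvStateOf s) then red ++ [pvStateOf s] else red

-- the second loop: for i in range(len(reduced)-2): check window (i, i+1, i+2)
def pvScan3 : List String → Bool
  | a :: b :: c :: rest =>
      if a = "stopped" ∧ b = "moving" ∧ c = "stopped" then true else pvScan3 (b :: c :: rest)
  | _ => false

def has_stopped_moved_stopped_py (segs : List (List (String × String))) : Bool :=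
  pvScan3 (segs.foldl pvReduceStep [])

-- ===== PORT B =====
-- streaming FSM: prev = last distinct state, phase ∈ {0,1,2}
def pvFsm : List (List (String × String)) → Option String → Nat → Bool
  | [], _, _ => false
  | s :: rest, prev, phase =>
      let st := pvStateOf s
      if some st = prev then pvFsm rest prev phase
      else if phase = 2 ∧ st = "stopped" then true
      else if phase = 1 ∧ st = "moving" then pvFsm rest (some st) 2
      else pvFsm rest (some st) (if st = "stopped" then 1 else 0)

def has_stopped_moved_stopped_py_alt (segs : List (List (String × String))) : Bool :=
  pvFsm segs none 0

-- ===== PRECONDITION & SPEC =====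
-- Pre_ excludes exactly the segments without a "state" key, on which the Python A raises KeyError.
def Pre_has_stopped_moved_stopped_py (segs : List (List (String × String))) : Prop :=
  ∀ s ∈ segs, ((PySem.Dict.mk s).contains "state") = true
instance (segs : List (List (String × String))) : Decidable (Pre_has_stopped_moved_stopped_py segs) := by unfold Pre_has_stopped_moved_stopped_py; infer_instance

def pvWitness_has_stopped_moved_stopped_py : (List (List (String × String))) :=
  [[("state", "stopped")], [("state", "moving")], [("state", "stopped")]]

def Spec_has_stopped_moved_stopped_py (segs : List (List (String × String))) (out : Bool) : Prop := out = has_stopped_moved_stopped_py_alt segs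
instance (segs : List (List (String × String))) (out : Bool) : Decidable (Spec_has_stopped_moved_stopped_py segs out) := by unfold Spec_has_stopped_moved_stopped_py; infer_instance

-- ===== CLAIM (what is proved, stated in full; the proofs are below) =====
def Claim_equal_has_stopped_moved_stopped_py : Prop := ∀ (segs : List (List (String × String))), Dom_has_stopped_moved_stopped_py segs → Pre_has_stopped_moved_stopped_py segs → Spec_has_stopped_moved_stopped_py segs (has_stopped_moved_stopped_py segs)

-- ===== LEMMAS AND PROOFS =====

lemma pvFsm_cons (s : List (String × String)) (rest : List (List (String × String)))
    (prev : Option String) (phase : Nat) :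
    pvFsm (s :: rest) prev phase =
      (if some (pvStateOf s) = prev then pvFsm rest prev phase
       else if phase = 2 ∧ pvStateOf s = "stopped" then true
       else if phase = 1 ∧ pvStateOf s = "moving" then pvFsm rest (some (pvStateOf s)) 2
       else pvFsm rest (some (pvStateOf s)) (if pvStateOf s = "stopped" then 1 else 0)) := rfl

-- the phase the FSM is in after reduced list R has been built
def pvPhaseOf (R : List String) : Nat :=
  if R.getLast? = some "moving" ∧ R.dropLast.getLast? = some "stopped" then 2
  else if R.getLast? = some "stopped" then 1 else 0

lemma pvScan3_append_true (R ys : List String) (h : pvScan3 R = true) :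
    pvScan3 (R ++ ys) = true := by
  induction R using pvScan3.induct with
  | case1 a b c rest hp => simp [pvScan3, hp]
  | case2 a b c rest hp ih =>
      simp only [pvScan3, if_neg hp] at h
      simpa [pvScan3, hp] using ih h
  | case3 t ht =>
      rcases t with _ | ⟨a, _ | ⟨b, _ | ⟨c, r⟩⟩⟩
      · simp [pvScan3] at h
      · simp [pvScan3] at h
      · simp [pvScan3] at h
      · exact absurd rfl (fun hh => ht a b c r hh)

lemma pvReduce_extends (segs : List (List (String × String))) :
    ∀ R, ∃ ext, segs.foldl pvReduceStep R = R ++ ext := by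
  induction segs with
  | nil => intro R; exact ⟨[], by simp⟩
  | cons s rest ih =>
      intro R
      by_cases h : R = [] ∨ R.getLast? ≠ some (pvStateOf s)
      · obtain ⟨ext, he⟩ := ih (R ++ [pvStateOf s])
        refine ⟨pvStateOf s :: ext, ?_⟩
        rw [List.foldl_cons]
        simp only [pvReduceStep, if_pos h]
        rw [he, List.append_assoc]
        rfl
      · obtain ⟨ext, he⟩ := ih R
        refine ⟨ext, ?_⟩
        rw [List.foldl_cons]
        simp only [pvReduceStep, if_neg h]
        exact he

lemma pvScan3_snoc (R : List String) (x : String) :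
    pvScan3 (R ++ [x]) =
      (pvScan3 R || (decide (R.getLast? = some "moving" ∧ R.dropLast.getLast? = some "stopped") && decide (x = "stopped"))) := by
  induction R using pvScan3.induct with
  | case1 a b c rest hp => simp [pvScan3, hp]
  | case2 a b c rest hp ih =>
      cases rest with
      | nil =>
          simp only [pvScan3, List.cons_append, List.nil_append, if_neg hp] at ih ⊢
          rw [ih]
          simp
      | cons d t =>
          simp only [pvScan3, List.cons_append, if_neg hp] at ih ⊢
          rw [ih]
          have e1 : (a::b::c::d::t : List String).getLast? = (b::c::d::t : List String).getLast? := by simp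
          have e2 : ((a::b::c::d::t : List String).dropLast).getLast? = ((b::c::d::t : List String).dropLast).getLast? := by simp
          rw [e1, e2]
  | case3 t ht =>
      rcases t with _ | ⟨a, _ | ⟨b, _ | ⟨c, r⟩⟩⟩
      · simp [pvScan3]
      · simp [pvScan3]
      · by_cases ha : a = "stopped" <;> by_cases hb : b = "moving" <;>
          by_cases hx2 : x = "stopped" <;> simp [pvScan3, ha, hb, hx2]
      · exact absurd rfl (fun hh => ht a b c r hh)

-- main invariant: given the reduced list R built so far (with no pattern yet),
-- the FSM started at (R.getLast?, phase of R) computes exactly A's final scan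
lemma pvMain (segs : List (List (String × String))) :
    ∀ R, pvScan3 R = false →
      pvFsm segs R.getLast? (pvPhaseOf R) = pvScan3 (segs.foldl pvReduceStep R) := by
  induction segs with
  | nil => intro R h; simp [pvFsm, h]
  | cons s rest ih =>
      intro R hR
      have hsnoc := pvScan3_snoc R (pvStateOf s)
      by_cases hskip : some (pvStateOf s) = R.getLast?
      · have hcond : ¬ (R = [] ∨ R.getLast? ≠ some (pvStateOf s)) := by
          rintro (h | h)
          · subst h; simp at hskip
          · exact h hskip.symm
        rw [List.foldl_cons]
        simp only [pvReduceStep, if_neg hcond]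
        rw [pvFsm_cons, if_pos hskip]
        exact ih R hR
      · -- distinct state: A appends, B transitions
        have hcond : (R = [] ∨ R.getLast? ≠ some (pvStateOf s)) := by
          right; exact fun h => hskip h.symm
        rw [List.foldl_cons]
        simp only [pvReduceStep, if_pos hcond]
        set st := pvStateOf s with hst
        by_cases htrue : pvPhaseOf R = 2 ∧ st = "stopped"
        · -- FSM returns true; the appended pattern completes and persists
          have h2 : R.getLast? = some "moving" ∧ R.dropLast.getLast? = some "stopped" := by
            by_contra hc
            have h1 := htrue.1
            unfold pvPhaseOf at h1
            rw [if_neg hc] at h1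
            split_ifs at h1; omega
          have hs3 : pvScan3 (R ++ [st]) = true := by
            rw [hsnoc, hR]
            simp [h2, htrue.2]
          obtain ⟨ext, he⟩ := pvReduce_extends rest (R ++ [st])
          rw [he, pvScan3_append_true (R ++ [st]) ext hs3]
          rw [pvFsm_cons]
          rw [← hst]
          rw [if_neg hskip]
          rw [if_pos htrue]
        · -- no detection yet: pattern still absent after append
          have hs3 : pvScan3 (R ++ [st]) = false := by
            rw [hsnoc, hR]
            simp only [Bool.false_or, Bool.and_eq_false_iff]
            by_cases hend : R.getLast? = some "moving" ∧ R.dropLast.getLast? = some "stopped"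
            · right
              have h2ph : pvPhaseOf R = 2 := by unfold pvPhaseOf; simp [hend]
              simp only [decide_eq_false_iff_not]
              exact fun hx => htrue ⟨h2ph, hx⟩
            · left; simp [hend]
          have hlast : (R ++ [st]).getLast? = some st := by simp
          have hdl : (R ++ [st]).dropLast = R := by simp
          have hphase : pvPhaseOf (R ++ [st]) =
              (if pvPhaseOf R = 1 ∧ st = "moving" then 2
               else if st = "stopped" then 1 else 0) := by
            unfold pvPhaseOf
            rw [hlast, hdl]
            by_cases hm : st = "moving"
            · by_cases hls : R.getLast? = some "stopped"
              · simp [hm, hls]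
              · have hR2 : ¬ (R.getLast? = some "moving" ∧ R.dropLast.getLast? = some "stopped") := by
                  intro hcc
                  exact hskip (by rw [hm, hcc.1])
                simp [hm, hls, hR2]
            · by_cases hs : st = "stopped" <;> simp [hm, hs]
          have hih := ih (R ++ [st]) hs3
          rw [hlast, hphase] at hih
          rw [← hih]
          rw [pvFsm_cons]
          rw [← hst, if_neg hskip, if_neg htrue]
          by_cases h12 : pvPhaseOf R = 1 ∧ st = "moving"
          · rw [if_pos h12, if_pos h12]
          · rw [if_neg h12, if_neg h12]

-- ===== VERDICT (by name: the statement is the Claim_ definition above) =====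
theorem has_stopped_moved_stopped_py_spec : Claim_equal_has_stopped_moved_stopped_py := by
  intro segs _ _
  unfold Spec_has_stopped_moved_stopped_py has_stopped_moved_stopped_py has_stopped_moved_stopped_py_alt
  have h := pvMain segs [] (by simp [pvScan3])
  simp only [List.getLast?_nil] at h
  rw [← h]
  rfl
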